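-- pv_equiv track=rewrite | github.com/Sreyan88/VDGD | hallucination_categorization/gpt_categorize_hallucinations_amber.py | get_word_indices_for_phrase
-- ===== SOURCE A (Python) =====
-- def get_word_indices_for_phrase(sentence, start_char_idx, end_char_idx):
--     words = sentence.split(" ")
--     # Cumulative character lengths will help us map character indices to word indices
--     cumulative_lengths = []
--     cumulative_length = 0
--
--     for word in words:
--         cumulative_length += len(word)
--         cumulative_lengths.append(cumulative_length)
--         cumulative_length += 1  # Account for the space between words
--
--     # Find the start word index
--     start_word_idx = next((i for i, cum_len in enumerate(cumulative_lengths) if cum_len > start_char_idx), None)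
--
--     # Adjust start_word_idx because it might point to the next word due to space
--     if start_word_idx is not None and cumulative_lengths[start_word_idx] - len(words[start_word_idx]) < start_char_idx:
--         start_word_idx -= 1
--
--     # Find the end word index
--     end_word_idx = next((i for i, cum_len in enumerate(cumulative_lengths) if cum_len >= end_char_idx), None)
--
--     # Return the range of word indices
--     return list(range(start_word_idx, end_word_idx + 1))
-- ===== SOURCE B (Python) =====
-- def get_word_indices_for_phrase(sentence, start_char_idx, end_char_idx):
--     # Single left-to-right pass over the words: track the running start position
--     # of the current word and record both word indices on the fly.
--     pos = 0
--     start_word_idx = None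
--     start_pos = 0
--     end_word_idx = None
--     for i, word in enumerate(sentence.split(" ")):
--         end = pos + len(word)
--         if start_word_idx is None and end > start_char_idx:
--             start_word_idx = i
--             start_pos = pos
--         if end_word_idx is None and end >= end_char_idx:
--             end_word_idx = i
--         pos = end + 1
--     if start_pos < start_char_idx:
--         start_word_idx -= 1
--     return list(range(start_word_idx, end_word_idx + 1))
-- ===== Notes on version B (the rewrite author's own statement) =====
-- stated objective: simpler
-- what changed: B replaces A's materialized cumulative-lengths list and two separate generator scans (plus list re-indexing for the adjustment) by a single left-to-right pass over the words that records both word indices and the start word's position on the fly.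
import Mathlib
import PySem

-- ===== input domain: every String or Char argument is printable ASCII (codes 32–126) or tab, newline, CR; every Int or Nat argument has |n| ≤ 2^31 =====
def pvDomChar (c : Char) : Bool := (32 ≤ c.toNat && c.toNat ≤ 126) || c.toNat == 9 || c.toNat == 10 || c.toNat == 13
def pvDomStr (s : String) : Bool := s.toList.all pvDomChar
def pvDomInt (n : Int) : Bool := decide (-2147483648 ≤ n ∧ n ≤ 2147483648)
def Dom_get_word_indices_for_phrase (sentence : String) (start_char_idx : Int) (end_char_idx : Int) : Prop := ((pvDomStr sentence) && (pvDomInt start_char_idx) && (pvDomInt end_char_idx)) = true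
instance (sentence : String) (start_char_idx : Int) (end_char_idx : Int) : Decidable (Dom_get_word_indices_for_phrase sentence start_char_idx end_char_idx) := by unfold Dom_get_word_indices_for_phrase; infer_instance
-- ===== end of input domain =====

-- B replaces A's cumulative-lengths list and its two separate scans by one left-to-right
-- pass recording both word indices on the fly (objective: simpler).


-- ===== PORT A =====
def get_word_indices_for_phrase (sentence : String) (start_char_idx : Int) (end_char_idx : Int) : List Int :=
  -- sep " " is nonempty, so split? is never none; getD [] is exact
  let words := (PySem.Str.split? sentence " ").getD []
  let cumulative_lengths := (words.foldl
    (fun (st : List Int × Int) word =>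
      (st.1 ++ [st.2 + PySem.Str.len word], st.2 + PySem.Str.len word + 1)) ([], 0)).1
  let start_word_idx0 := ((PySem.List.enumerate cumulative_lengths 0).find?
    (fun p => decide (p.2 > start_char_idx))).map (·.1)
  -- indices produced by the scan are always valid, so pyGetD with a default is exact here
  let start_word_idx : Option Int :=
    match start_word_idx0 with
    | none => none
    | some i =>
        if PySem.List.pyGetD cumulative_lengths i 0
            - PySem.Str.len (PySem.List.pyGetD words i "") < start_char_idx
        then some (i - 1) else some i
  let end_word_idx := ((PySem.List.enumerate cumulative_lengths 0).find?
    (fun p => decide (p.2 ≥ end_char_idx))).map (·.1)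
  match start_word_idx, end_word_idx with
  | some s, some e => PySem.List.pyRange s (e + 1) 1
  | _, _ => []  -- Python raises TypeError here (range(None, …)); excluded by Pre_

-- ===== PORT B =====
-- the for-loop of Source B: state (pos, i, start_word_idx, start_pos, end_word_idx)
def pvBLoop (start_char_idx end_char_idx : Int) :
    List String → Int → Int → Option Int → Int → Option Int → Option Int × Int × Option Int
  | [], _, _, sIdx, sPos, eIdx => (sIdx, sPos, eIdx)
  | word :: rest, pos, i, sIdx, sPos, eIdx =>
    let e := pos + PySem.Str.len word
    let s' : Option Int × Int := if sIdx = none ∧ e > start_char_idx then (some i, pos) else (sIdx, sPos)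
    let e' : Option Int := if eIdx = none ∧ e ≥ end_char_idx then some i else eIdx
    pvBLoop start_char_idx end_char_idx rest (e + 1) (i + 1) s'.1 s'.2 e'

def get_word_indices_for_phrase_alt (sentence : String) (start_char_idx : Int) (end_char_idx : Int) : List Int :=
  let words := (PySem.Str.split? sentence " ").getD []
  match pvBLoop start_char_idx end_char_idx words 0 0 none 0 none with
  | (some si, sPos, some ei) =>
      PySem.List.pyRange (if sPos < start_char_idx then si - 1 else si) (ei + 1) 1
  -- Python raises TypeError in the remaining cases; excluded by Pre_
  | (some _, _, none) => []
  | (none, _, some _) => []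
  | (none, _, none) => []

-- ===== PRECONDITION & SPEC =====
-- Pre_ excludes exactly the inputs on which A raises TypeError (start_word_idx or
-- end_word_idx stays None): start_char_idx ≥ len(sentence) or end_char_idx > len(sentence).
def Pre_get_word_indices_for_phrase (sentence : String) (start_char_idx : Int) (end_char_idx : Int) : Prop :=
  start_char_idx < PySem.Str.len sentence ∧ end_char_idx ≤ PySem.Str.len sentence
instance (sentence : String) (start_char_idx : Int) (end_char_idx : Int) : Decidable (Pre_get_word_indices_for_phrase sentence start_char_idx end_char_idx) := by unfold Pre_get_word_indices_for_phrase; infer_instance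
def pvWitness_get_word_indices_for_phrase : String × Int × Int := ("a b", 0, 3)

def Spec_get_word_indices_for_phrase (sentence : String) (start_char_idx : Int) (end_char_idx : Int) (out : List Int) : Prop := out = get_word_indices_for_phrase_alt sentence start_char_idx end_char_idx
instance (sentence : String) (start_char_idx : Int) (end_char_idx : Int) (out : List Int) : Decidable (Spec_get_word_indices_for_phrase sentence start_char_idx end_char_idx out) := by unfold Spec_get_word_indices_for_phrase; infer_instance

-- ===== CLAIM (what is proved, stated in full; the proofs are below) =====
def Claim_equal_get_word_indices_for_phrase : Prop := ∀ (sentence : String) (start_char_idx : Int) (end_char_idx : Int), Dom_get_word_indices_for_phrase sentence start_char_idx end_char_idx → Pre_get_word_indices_for_phrase sentence start_char_idx end_char_idx → Spec_get_word_indices_for_phrase sentence start_char_idx end_char_idx (get_word_indices_for_phrase sentence start_char_idx end_char_idx)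

-- ===== LEMMAS AND PROOFS =====

-- the cumulative-lengths list of A, written structurally
def pvCums : List String → Int → List Int
  | [], _ => []
  | w :: t, c => (c + PySem.Str.len w) :: pvCums t (c + PySem.Str.len w + 1)

-- spec of B's start search: first word whose end exceeds s, with its index and start position
def pvFindS (s : Int) : List String → Int → Int → Option (Int × Int × Int)
  | [], _, _ => none
  | w :: t, pos, i =>
    let e := pos + PySem.Str.len w
    if e > s then some (i, pos, e) else pvFindS s t (e + 1) (i + 1)

-- spec of B's end search: index of first word whose end reaches e
def pvFindE (e : Int) : List String → Int → Int → Option Int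
  | [], _, _ => none
  | w :: t, pos, i =>
    let en := pos + PySem.Str.len w
    if en ≥ e then some i else pvFindE e t (en + 1) (i + 1)

lemma pvCums_foldl (ws : List String) : ∀ (acc : List Int) (c : Int),
    (ws.foldl (fun (st : List Int × Int) word =>
      (st.1 ++ [st.2 + PySem.Str.len word], st.2 + PySem.Str.len word + 1)) (acc, c)).1
    = acc ++ pvCums ws c := by
  induction ws with
  | nil => simp [pvCums]
  | cons w t ih =>
    intro acc c
    simp only [List.foldl_cons]
    rw [ih]
    simp [pvCums]

lemma pvFindS_find? (s : Int) (ws : List String) : ∀ (c i : Int),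
    (PySem.List.enumerate (pvCums ws c) i).find? (fun p => decide (p.2 > s))
    = (pvFindS s ws c i).map (fun t => (t.1, t.2.2)) := by
  induction ws with
  | nil => intro c i; simp [pvCums, pvFindS, PySem.List.enumerate_nil]
  | cons w t ih =>
    intro c i
    simp only [pvCums, pvFindS, PySem.List.enumerate_cons, List.find?_cons]
    by_cases h : s < c + ((w.length : Int))
    · simp [h]
    · simp [h, ih]

lemma pvFindE_find? (e : Int) (ws : List String) : ∀ (c i : Int),
    ((PySem.List.enumerate (pvCums ws c) i).find? (fun p => decide (p.2 ≥ e))).map (·.1)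
    = pvFindE e ws c i := by
  induction ws with
  | nil => intro c i; simp [pvCums, pvFindE, PySem.List.enumerate_nil]
  | cons w t ih =>
    intro c i
    simp only [pvCums, pvFindE, PySem.List.enumerate_cons, List.find?_cons]
    by_cases h : e ≤ c + ((w.length : Int))
    · simp [h]
    · simp [h, ih]

-- at the index found by the start search, A's cums/words lookups recover cum and pos
lemma pvFindS_getD (s : Int) (ws : List String) : ∀ (c i j p cum : Int),
    pvFindS s ws c i = some (j, p, cum) →
    i ≤ j ∧ PySem.List.pyGetD (pvCums ws c) (j - i) 0 = cum ∧
      PySem.Str.len (PySem.List.pyGetD ws (j - i) "") = cum - p := by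
  induction ws with
  | nil => intro c i j p cum h; simp [pvFindS] at h
  | cons w t ih =>
    intro c i j p cum h
    simp only [pvFindS] at h
    by_cases hc : s < c + ((w.length : Int))
    · simp [hc] at h
      obtain ⟨hj, hp, hcum⟩ := h
      subst hj hp hcum
      refine ⟨le_refl _, ?_, ?_⟩ <;>
        simp [pvCums, PySem.List.pyGetD_zero_cons]
    · simp [hc] at h
      obtain ⟨hij, hget, hlen⟩ := ih _ _ _ _ _ h
      refine ⟨by omega, ?_, ?_⟩
      · have hk : j - i = (((j - i - 1).toNat + 1 : Nat) : Int) := by omega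
        rw [pvCums, hk, PySem.List.pyGetD_natCast]
        simp only [List.getD, List.getElem?_cons_succ]
        have hk2 : j - (i + 1) = (((j - i - 1).toNat : Nat) : Int) := by omega
        rw [hk2, PySem.List.pyGetD_natCast] at hget
        simpa [List.getD] using hget
      · have hk : j - i = (((j - i - 1).toNat + 1 : Nat) : Int) := by omega
        rw [hk, PySem.List.pyGetD_natCast]
        simp only [List.getD, List.getElem?_cons_succ]
        have hk2 : j - (i + 1) = (((j - i - 1).toNat : Nat) : Int) := by omega
        rw [hk2, PySem.List.pyGetD_natCast] at hlen
        simpa [List.getD] using hlen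

-- B's loop is the two searches run side by side
lemma pvBLoop_spec (s e : Int) (ws : List String) : ∀ (pos i : Int) (sIdx : Option Int) (sPos : Int) (eIdx : Option Int),
    pvBLoop s e ws pos i sIdx sPos eIdx =
      ((match sIdx with
        | some j => (some j, sPos)
        | none => match pvFindS s ws pos i with
                  | some (j, p, _) => (some j, p)
                  | none => (none, sPos) : Option Int × Int).1,
       (match sIdx with
        | some j => (some j, sPos)
        | none => match pvFindS s ws pos i with
                  | some (j, p, _) => (some j, p)
                  | none => (none, sPos) : Option Int × Int).2,
       (match eIdx with
        | some j => some j
        | none => pvFindE e ws pos i)) := by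
  induction ws with
  | nil =>
    intro pos i sIdx sPos eIdx
    cases sIdx <;> cases eIdx <;> simp [pvBLoop, pvFindS, pvFindE]
  | cons w t ih =>
    intro pos i sIdx sPos eIdx
    simp only [pvBLoop]
    rw [ih]
    cases sIdx with
    | some j =>
      cases eIdx with
      | some k => simp
      | none =>
        simp only [pvFindE]
        by_cases he : e ≤ pos + ((w.length : Int)) <;> simp [he]
    | none =>
      cases eIdx with
      | some k =>
        simp only [pvFindS]
        by_cases hs : s < pos + ((w.length : Int)) <;> simp [hs]
      | none =>
        simp only [pvFindS, pvFindE]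
        by_cases hs : s < pos + ((w.length : Int)) <;>
          by_cases he : e ≤ pos + ((w.length : Int)) <;>
            simp [hs, he]

-- ===== VERDICT (by name: the statement is the Claim_ definition above) =====
theorem get_word_indices_for_phrase_spec : Claim_equal_get_word_indices_for_phrase := by
  intro sentence start_char_idx end_char_idx _dom _pre
  unfold Spec_get_word_indices_for_phrase
  unfold get_word_indices_for_phrase get_word_indices_for_phrase_alt
  simp only [pvCums_foldl, List.nil_append, pvFindS_find?, pvFindE_find?, pvBLoop_spec]
  set ws := (PySem.Str.split? sentence " ").getD []
  cases hS : pvFindS start_char_idx ws 0 0 with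
  | none =>
    cases hE : pvFindE end_char_idx ws 0 0 with
    | none => simp
    | some k => simp
  | some t =>
    obtain ⟨j, p, cum⟩ := t
    obtain ⟨-, hget, hlen⟩ := pvFindS_getD start_char_idx ws 0 0 j p cum hS
    simp only [sub_zero] at hget hlen
    cases hE : pvFindE end_char_idx ws 0 0 with
    | none => simp
    | some k =>
      simp only [Option.map_some]
      rw [hget, hlen]
      have : cum - (cum - p) = p := by ring
      rw [this]
      by_cases hc : p < start_char_idx <;> simp [hc]
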